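-- pv_equiv track=rewrite | github.com/jclarkrichards/binarySpacePartitioner | Primitives/sector.py | getMostEvenSplit
-- ===== SOURCE A (Python) =====
-- def getMostEvenSplit(DM):
--     '''The division matrix has left and right.  We subtract the 2 and return the segment with the lowest value'''
--     D = {}
--     for key in DM.keys():
--         D[key] = abs(DM[key]["left"] - DM[key]["right"])
--     minval = min(D.values())
--     for key in D.keys():
--         if D[key] == minval:
--             return key
--     return None
-- ===== SOURCE B (Python) =====
-- def getMostEvenSplit(DM):
--     '''Rank every key by |left - right| with a stable sort and take the best-ranked one.
--     Stability makes ties keep insertion order, i.e. the earliest key wins.'''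
--     ranked = sorted(DM, key=lambda k: abs(DM[k]["left"] - DM[k]["right"]))
--     return ranked[0]
-- ===== Notes on version B (the rewrite author's own statement) =====
-- stated objective: alternative
-- what changed: Replaces build-a-diff-dict, min over its values and a second key scan by sorting the keys with Python's stable sort on |left-right| and returning the first element of the sorted list; stability gives exactly A's earliest-key tie-break. Trades A's linear scans for an O(n log n) sort. Pre_ excludes the empty dict (A raises ValueError, B IndexError) and inner dicts missing 'left'/'right' (both raise KeyError).
import Mathlib
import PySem

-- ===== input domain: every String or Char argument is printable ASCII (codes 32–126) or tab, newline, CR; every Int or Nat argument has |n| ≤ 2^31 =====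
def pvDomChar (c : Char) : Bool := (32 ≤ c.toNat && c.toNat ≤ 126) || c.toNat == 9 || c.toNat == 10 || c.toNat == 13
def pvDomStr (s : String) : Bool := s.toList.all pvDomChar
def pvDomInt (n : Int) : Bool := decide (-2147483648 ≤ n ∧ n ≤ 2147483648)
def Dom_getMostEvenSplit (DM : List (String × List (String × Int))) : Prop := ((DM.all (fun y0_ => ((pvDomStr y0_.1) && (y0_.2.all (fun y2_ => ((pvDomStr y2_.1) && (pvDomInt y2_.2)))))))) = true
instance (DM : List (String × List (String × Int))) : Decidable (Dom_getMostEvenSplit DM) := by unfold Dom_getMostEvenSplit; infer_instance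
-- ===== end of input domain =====

-- B replaces A's build-diff-dict / min-over-values / rescan-for-key by stably sorting the keys on |left-right| and taking the first (alternative decomposition; O(n log n) vs A's O(n)).


-- ===== PORT A =====
-- abs(DM[key]["left"] - DM[key]["right"]); under Pre_ the inner dict contains both keys, so getD is exact for DM[key][...]
def pvDiff (dm : PySem.Dict String (List (String × Int))) (key : String) : Int :=
  |((PySem.Dict.ofList (dm.getD key [])).getD "left" 0) - ((PySem.Dict.ofList (dm.getD key [])).getD "right" 0)|

def getMostEvenSplit (DM : List (String × List (String × Int))) : Option String :=
  let dm := PySem.Dict.ofList DM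
  -- D = {}; for key in DM.keys(): D[key] = abs(DM[key]["left"] - DM[key]["right"])
  let D : PySem.Dict String Int :=
    dm.keys.foldl (fun d key => d.insert key (pvDiff dm key)) PySem.Dict.empty
  -- minval = min(D.values())  (Python raises ValueError on an empty dict: none here, excluded by Pre_)
  match PySem.List.min? D.values (fun v => v) with
  | none => none
  | some minval =>
    -- for key in D.keys(): if D[key] == minval: return key;  return None (unreachable: find? always hits)
    D.keys.find? (fun key => D.getD key 0 == minval)

-- ===== PORT B =====
-- ranked = sorted(DM, key=lambda k: abs(DM[k]["left"] - DM[k]["right"]));  return ranked[0]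
-- (ranked[0] on the empty list is Python's IndexError: none here, excluded by Pre_)
def getMostEvenSplit_alt (DM : List (String × List (String × Int))) : Option String :=
  let dm := PySem.Dict.ofList DM
  let ranked := PySem.List.sorted dm.keys (fun k => pvDiff dm k)
  PySem.List.pyGet? ranked 0

-- ===== PRECONDITION & SPEC =====
-- Pre_ excludes exactly where Python A raises: the empty dict (min of no values: ValueError) and
-- entries whose inner dict lacks "left" or "right" (KeyError); membership is read on the dict view
-- (PySem.Dict.ofList DM).items, i.e. the entries the Python dict actually holds.
def Pre_getMostEvenSplit (DM : List (String × List (String × Int))) : Prop :=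
  DM ≠ [] ∧ ∀ p ∈ (PySem.Dict.ofList DM).items,
    "left" ∈ p.2.map Prod.fst ∧ "right" ∈ p.2.map Prod.fst
instance (DM : List (String × List (String × Int))) : Decidable (Pre_getMostEvenSplit DM) := by
  unfold Pre_getMostEvenSplit; infer_instance
def pvWitness_getMostEvenSplit : (List (String × List (String × Int))) :=
  [("a", [("left", 5), ("right", 1)]), ("b", [("left", 3), ("right", 2)])]

def Spec_getMostEvenSplit (DM : List (String × List (String × Int))) (out : Option String) : Prop := out = getMostEvenSplit_alt DM
instance (DM : List (String × List (String × Int))) (out : Option String) : Decidable (Spec_getMostEvenSplit DM out) := by unfold Spec_getMostEvenSplit; infer_instance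

-- ===== CLAIM (what is proved, stated in full; the proofs are below) =====
def Claim_equal_getMostEvenSplit : Prop := ∀ (DM : List (String × List (String × Int))), Dom_getMostEvenSplit DM → Pre_getMostEvenSplit DM → Spec_getMostEvenSplit DM (getMostEvenSplit DM)

-- ===== LEMMAS AND PROOFS =====

-- min? with a cons head is the running "keep the strictly smaller, else the earlier" fold
theorem pvMin?_cons {α κ : Type} [LinearOrder κ] (f : α → κ) (x : α) (t : List α) :
    PySem.List.min? (x :: t) f = some (t.foldl (fun a y => if f y < f a then y else a) x) := by
  show List.foldl _ (some x) t = _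
  induction t generalizing x with
  | nil => rfl
  | cons y t ih =>
    simp only [List.foldl_cons]
    by_cases h : f y < f x <;> simp [h, ih]

-- the fold's result never has a larger key than its start
theorem pvFold_le {α κ : Type} [LinearOrder κ] (f : α → κ) (t : List α) (x : α) :
    f (t.foldl (fun a y => if f y < f a then y else a) x) ≤ f x := by
  induction t generalizing x with
  | nil => simp
  | cons y t ih =>
    simp only [List.foldl_cons]
    by_cases h : f y < f x
    · simp only [if_pos h]; exact le_of_lt (lt_of_le_of_lt (ih y) h)
    · simp only [if_neg h]; exact ih x

-- min over the mapped keys is the key of the first min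
theorem pvMin?_map_aux {α κ : Type} [LinearOrder κ] (f : α → κ) (ks : List α) (acc : Option α) :
    List.foldl (fun acc v => match acc with
                             | none => some v
                             | some m => if v < m then some v else some m)
        (acc.map f) (ks.map f)
      = (List.foldl (fun acc x => match acc with
                                  | none => some x
                                  | some m => if f x < f m then some x else some m)
          acc ks).map f := by
  induction ks generalizing acc with
  | nil => rfl
  | cons x t ih =>
    simp only [List.map_cons, List.foldl_cons]
    rw [← ih]
    congr 1
    cases acc with
    | none => rfl
    | some m => by_cases h : f x < f m <;> simp [h]

theorem pvMin?_map {α κ : Type} [LinearOrder κ] (f : α → κ) (ks : List α) :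
    PySem.List.min? (ks.map f) (fun v => v) = (PySem.List.min? ks f).map f := by
  simpa [PySem.List.min?] using pvMin?_map_aux f ks none

-- the first minimum under f is the first element whose key equals the minimum key
theorem pvFind_min {α κ : Type} [LinearOrder κ] [BEq κ] [LawfulBEq κ]
    (f : α → κ) (t : List α) (x : α) :
    (x :: t).find? (fun k => f k == f (t.foldl (fun a y => if f y < f a then y else a) x)) =
      some (t.foldl (fun a y => if f y < f a then y else a) x) := by
  induction t generalizing x with
  | nil => simp
  | cons y t ih =>
    simp only [List.foldl_cons]
    by_cases h : f y < f x
    · simp only [if_pos h]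
      have hM := pvFold_le f t y
      have hih := ih y
      generalize hMeq : List.foldl (fun a y => if f y < f a then y else a) y t = M at hM hih ⊢
      have hne : ¬ ((fun k => f k == f M) x) = true := by
        simp only [beq_iff_eq]
        exact fun he => absurd (he ▸ hM) (not_le.mpr h)
      rw [List.find?_cons_of_neg (p := fun k => f k == f M) hne]
      exact hih
    · simp only [if_neg h]
      have hxy : f x ≤ f y := le_of_not_gt h
      have hM := pvFold_le f t x
      have hih := ih x
      generalize hMeq : List.foldl (fun a y => if f y < f a then y else a) x t = M at hM hih ⊢
      by_cases hx : ((fun k => f k == f M) x) = true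
      · rw [List.find?_cons_of_pos (p := fun k => f k == f M) hx]
        rw [List.find?_cons_of_pos (p := fun k => f k == f M) hx] at hih
        exact hih
      · rw [List.find?_cons_of_neg (p := fun k => f k == f M) hx]
        rw [List.find?_cons_of_neg (p := fun k => f k == f M) hx] at hih
        have hMx : f M ≠ f x := by
          intro he; exact hx (by simp [he])
        have hny : ¬ ((fun k => f k == f M) y) = true := by
          simp only [beq_iff_eq]
          intro he
          exact hMx (le_antisymm hM (he ▸ hxy))
        rw [List.find?_cons_of_neg (p := fun k => f k == f M) hny]
        exact hih

-- find? only looks at members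
theorem pvFind?_congr {α : Type} (l : List α) (p q : α → Bool)
    (h : ∀ x ∈ l, p x = q x) : l.find? p = l.find? q := by
  induction l with
  | nil => rfl
  | cons x t ih =>
    rw [List.find?_cons, List.find?_cons, h x (List.mem_cons_self ..),
        ih (fun y hy => h y (List.mem_cons_of_mem _ hy))]

-- the diff dict A builds: items, keys, values, lookups
theorem pvD_items (dm : PySem.Dict String (List (String × Int))) (hnd : dm.keys.Nodup) :
    (dm.keys.foldl (fun d key => d.insert key (pvDiff dm key)) PySem.Dict.empty).items
      = dm.keys.map (fun k => (k, pvDiff dm k)) := by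
  have := PySem.Dict.items_foldl_insert_fresh dm.keys (fun k => k) (pvDiff dm)
    (PySem.Dict.empty) (by intro a _; simp [pysem]) (by simpa using hnd)
  simpa using this

-- head of the stable insertion step = the min? accumulator step
theorem pvHead_insertBy {α κ : Type} [LinearOrder κ] (f : α → κ) (x : α) (ys : List α) :
    (PySem.List.insertBy (fun a b => decide (f a < f b)) x ys).head?
      = (match ys.head? with
         | none => some x
         | some m => if f x < f m then some x else some m) := by
  cases ys with
  | nil => rfl
  | cons y t =>
    by_cases h : f x < f y <;> simp [PySem.List.insertBy, h]

-- head of the stable insertion-sort fold is the min? fold (B's sorted-head = A's first minimum)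
theorem pvHead_sortFold {α κ : Type} [LinearOrder κ] (f : α → κ) (xs acc : List α) :
    (xs.foldl (fun acc x => PySem.List.insertBy (fun a b => decide (f a < f b)) x acc) acc).head?
      = xs.foldl (fun a x => match a with
                             | none => some x
                             | some m => if f x < f m then some x else some m) acc.head? := by
  induction xs generalizing acc with
  | nil => rfl
  | cons x t ih =>
    simp only [List.foldl_cons]
    rw [ih, pvHead_insertBy]

theorem pvSorted_head_eq_min? {α κ : Type} [LinearOrder κ] (f : α → κ) (xs : List α) :
    (PySem.List.sorted xs f).head? = PySem.List.min? xs f := by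
  show (xs.foldl (fun acc x => PySem.List.insertBy (fun a b => decide (f a < f b)) x acc) []).head? = _
  rw [pvHead_sortFold]
  rfl

-- xs[0] is xs.head?
theorem pvPyGet?_zero {α : Type} (xs : List α) : PySem.List.pyGet? xs 0 = xs.head? := by
  cases xs <;> simp [PySem.List.pyGet?, PySem.List.pyIdx?]

-- the whole of A's body, over the dict view, equals the first minimum over the keys
theorem pvMain (dm : PySem.Dict String (List (String × Int))) (hnd : dm.keys.Nodup) :
    (match PySem.List.min?
        (dm.keys.foldl (fun d key => d.insert key (pvDiff dm key)) PySem.Dict.empty).values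
        (fun v => v) with
     | none => none
     | some minval =>
        (dm.keys.foldl (fun d key => d.insert key (pvDiff dm key)) PySem.Dict.empty).keys.find?
          (fun key => (dm.keys.foldl (fun d key => d.insert key (pvDiff dm key)) PySem.Dict.empty).getD key 0 == minval))
      = PySem.List.min? dm.keys (fun k => pvDiff dm k) := by
  set D := dm.keys.foldl (fun d key => d.insert key (pvDiff dm key)) PySem.Dict.empty with hD
  have hitems : D.items = dm.keys.map (fun k => (k, pvDiff dm k)) := pvD_items dm hnd
  have hkeys : D.keys = dm.keys := by
    show D.items.map Prod.fst = dm.keys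
    rw [hitems]; simp [Function.comp_def]
  have hvals : D.values = dm.keys.map (pvDiff dm) := by
    show D.items.map Prod.snd = dm.keys.map (pvDiff dm)
    rw [hitems]; simp [Function.comp_def]
  have hDnd : D.keys.Nodup := hkeys ▸ hnd
  have hgetD : ∀ k ∈ dm.keys, D.getD k 0 = pvDiff dm k := by
    intro k hk
    exact PySem.Dict.getD_of_mem_items D
      (by rw [hitems]; exact List.mem_map.mpr ⟨k, hk, rfl⟩) hDnd 0
  rw [hvals, pvMin?_map]
  cases hmin : PySem.List.min? dm.keys (fun k => pvDiff dm k) with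
  | none => rfl
  | some m =>
    simp only [Option.map_some]
    rw [hkeys]
    rw [pvFind?_congr dm.keys _ (fun k => pvDiff dm k == pvDiff dm m)
      (fun k hk => by rw [hgetD k hk])]
    cases ht : dm.keys with
    | nil => rw [ht] at hmin; simp [PySem.List.min?] at hmin
    | cons x t =>
      rw [ht] at hmin
      rw [pvMin?_cons] at hmin
      obtain rfl : t.foldl (fun a y => if pvDiff dm y < pvDiff dm a then y else a) x = m :=
        Option.some.inj hmin
      exact pvFind_min (pvDiff dm) t x

-- ===== VERDICT (by name: the statement is the Claim_ definition above) =====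
theorem getMostEvenSplit_spec : Claim_equal_getMostEvenSplit := by
  intro DM _ _
  show getMostEvenSplit DM = getMostEvenSplit_alt DM
  unfold getMostEvenSplit getMostEvenSplit_alt
  rw [pvPyGet?_zero, pvSorted_head_eq_min?]
  exact pvMain (PySem.Dict.ofList DM) (PySem.Dict.nodup_keys_ofList DM)
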